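-- pv_equiv track=rewrite | github.com/04633435/quiz-a-day | Archive_fiture/weekly-contest/280-2-minumumremoval.py | minumum_removal
-- ===== SOURCE A (Python) =====
-- from collections import deque
--
-- def minumum_removal(beans):
--     def recursion(q, sum_, n_non_zero, pre_count):
--
--         minimum = q.popleft()
--
--         count = sum_ - n_non_zero * minimum
--         if count == 0:
--             return pre_count
--         else:
--             sum_ -= minimum
--             return min(count + pre_count, recursion(q, sum_, n_non_zero-1, pre_count+minimum))
--
--     sum_ = sum(beans)
--     n_non_zero = 0
--     for i in beans:
--         if i != 0:
--             n_non_zero += 1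
--     q = deque(sorted(beans))
--
--     return recursion(q, sum_, n_non_zero, 0)
-- ===== SOURCE B (Python) =====
-- def minumum_removal(beans):
--     # Same answer via the algebraic identity: at level k of the sorted list the
--     # removal cost is total - (nz - k) * xs[k]; scan once keeping a running min
--     # and a prefix sum, stopping at the first level whose non-zero bags are equal.
--     xs = sorted(beans)
--     total = sum(xs)
--     nz = sum(1 for b in beans if b != 0)
--     best = None
--     prefix = 0
--     for k, b in enumerate(xs):
--         v = total - (nz - k) * b
--         best = v if best is None else min(best, v)
--         if v == prefix:
--             return best
--         prefix += b
--     return best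
-- ===== Notes on version B (the rewrite author's own statement) =====
-- stated objective: simpler
-- what changed: Replaces the deque-popping recursion that threads (sum_, n_non_zero, pre_count) and nests min through the call stack by a single forward scan over the sorted list using the closed-form level cost total - (nz - k) * xs[k], a prefix sum for the stopping test, and a running minimum.
-- outside the precondition, e.g. on minumum_removal([0, 1]): A raises IndexError, B returns 1; on minumum_removal([-1, 0]): A returns 0, B returns 0
import Mathlib
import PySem

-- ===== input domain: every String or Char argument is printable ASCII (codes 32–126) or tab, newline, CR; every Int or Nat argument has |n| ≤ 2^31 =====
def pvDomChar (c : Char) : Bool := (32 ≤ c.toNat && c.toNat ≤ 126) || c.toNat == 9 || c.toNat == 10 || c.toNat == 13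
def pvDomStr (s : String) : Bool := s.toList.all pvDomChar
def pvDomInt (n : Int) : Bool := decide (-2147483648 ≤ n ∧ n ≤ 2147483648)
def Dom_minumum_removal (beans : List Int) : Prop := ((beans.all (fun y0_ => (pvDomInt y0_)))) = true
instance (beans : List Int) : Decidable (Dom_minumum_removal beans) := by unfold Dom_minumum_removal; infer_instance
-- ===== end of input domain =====

-- B replaces A's deque-popping recursion (threading sum_/n_non_zero/pre_count and nesting
-- min through the call stack) by one forward scan over the sorted list using the closed-form
-- level cost total - (nz - k) * xs[k], a prefix sum and a running minimum; objective: simpler.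

-- ===== PORT A =====
-- recursion(q, sum_, n_non_zero, pre_count); none = IndexError from q.popleft() on empty q
def pvRecA : List Int → Int → Int → Int → Option Int
  | [], _, _, _ => none
  | x :: q, s, nz, pre =>
    if s - nz * x = 0 then some pre
    else (pvRecA q (s - x) (nz - 1) (pre + x)).map (fun v => min (s - nz * x + pre) v)

def minumum_removal (beans : List Int) : Int :=
  let sum_ : Int := beans.sum
  let n_non_zero : Int := beans.foldl (fun acc i => if i != 0 then acc + 1 else acc) 0
  let q := PySem.List.sorted beans (fun x => x) false
  -- on inputs where Python raises IndexError (excluded by Pre_) the port returns 0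
  (pvRecA q sum_ n_non_zero 0).getD 0

-- ===== PORT B =====
-- the for-loop of Source B; best is None before the first level; returns best when the list is exhausted
def pvLoopB : List Int → Int → Int → Int → Int → Option Int → Option Int
  | [], _, _, _, _, best => best
  | b :: q, total, nz, k, pfx, best =>
    let v := total - (nz - k) * b
    let best' : Option Int := some (match best with | none => v | some m => min m v)
    if v = pfx then best' else pvLoopB q total nz (k + 1) (pfx + b) best'

def minumum_removal_alt (beans : List Int) : Int :=
  let xs := PySem.List.sorted beans (fun x => x) false
  let total : Int := xs.sum
  let nz : Int := ((beans.filter (fun b => b != 0)).map (fun _ => (1 : Int))).sum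
  -- on empty beans Source B returns None (excluded by Pre_); the port returns 0
  (pvLoopB xs total nz 0 0 none).getD 0

-- ===== PRECONDITION & SPEC =====
-- Pre_ excludes empty lists and lists that mix 0 with other values: there A's q.popleft()
-- raises IndexError in general (the rare negative-value corners of this region on which A
-- still returns are matched by B anyway; see the cited examples).
def Pre_minumum_removal (beans : List Int) : Prop :=
  beans ≠ [] ∧ ((∀ x ∈ beans, x ≠ 0) ∨ (∀ x ∈ beans, x = 0))
instance (beans : List Int) : Decidable (Pre_minumum_removal beans) := by
  unfold Pre_minumum_removal; infer_instance
def pvWitness_minumum_removal : List Int := [4, 1, 6, 5]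
def Spec_minumum_removal (beans : List Int) (out : Int) : Prop := out = minumum_removal_alt beans
instance (beans : List Int) (out : Int) : Decidable (Spec_minumum_removal beans out) := by unfold Spec_minumum_removal; infer_instance

-- ===== CLAIM (what is proved, stated in full; the proofs are below) =====
def Claim_equal_minumum_removal : Prop := ∀ (beans : List Int), Dom_minumum_removal beans → Pre_minumum_removal beans → Spec_minumum_removal beans (minumum_removal beans)

-- ===== LEMMAS AND PROOFS =====

-- the running-min loop computes A's nested min (some-accumulator case)
theorem pvLoopB_some (q : List Int) : ∀ (t nz k p m v : Int),
    pvRecA q (t - p) (nz - k) p = some v →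
    pvLoopB q t nz k p (some m) = some (min m v) := by
  induction q with
  | nil => intro t nz k p m v h; simp [pvRecA] at h
  | cons x q ih =>
    intro t nz k p m v h
    simp only [pvRecA] at h
    simp only [pvLoopB]
    by_cases h0 : t - p - (nz - k) * x = 0
    · rw [if_pos h0] at h
      have hvp : v = p := by simpa using h.symm
      have hcond : t - (nz - k) * x = p := by
        generalize (nz - k) * x = c at h0 ⊢; omega
      rw [if_pos hcond, hcond, hvp]
    · rw [if_neg h0] at h
      have hcond : ¬ t - (nz - k) * x = p := by
        generalize (nz - k) * x = c at h0 ⊢; omega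
      rw [if_neg hcond]
      obtain ⟨w, hw, hv⟩ := Option.map_eq_some_iff.mp h
      have hw' : pvRecA q (t - (p + x)) (nz - (k + 1)) (p + x) = some w := by
        have e1 : t - (p + x) = t - p - x := by ring
        have e2 : nz - (k + 1) = nz - k - 1 := by ring
        rw [e1, e2]; exact hw
      rw [ih t nz (k + 1) (p + x) (min m (t - (nz - k) * x)) w hw']
      have : t - p - (nz - k) * x + p = t - (nz - k) * x := by ring
      rw [this] at hv
      rw [← hv, min_assoc]

-- the running-min loop started with best = None computes A's recursion exactly
theorem pvLoopB_none (q : List Int) : ∀ (t nz k p v : Int),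
    pvRecA q (t - p) (nz - k) p = some v →
    pvLoopB q t nz k p none = some v := by
  cases q with
  | nil => intro t nz k p v h; simp [pvRecA] at h
  | cons x q =>
    intro t nz k p v h
    simp only [pvRecA] at h
    simp only [pvLoopB]
    by_cases h0 : t - p - (nz - k) * x = 0
    · rw [if_pos h0] at h
      have hvp : v = p := by simpa using h.symm
      have hcond : t - (nz - k) * x = p := by
        generalize (nz - k) * x = c at h0 ⊢; omega
      rw [if_pos hcond, hcond, hvp]
    · rw [if_neg h0] at h
      have hcond : ¬ t - (nz - k) * x = p := by
        generalize (nz - k) * x = c at h0 ⊢; omega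
      rw [if_neg hcond]
      obtain ⟨w, hw, hv⟩ := Option.map_eq_some_iff.mp h
      have hw' : pvRecA q (t - (p + x)) (nz - (k + 1)) (p + x) = some w := by
        have e1 : t - (p + x) = t - p - x := by ring
        have e2 : nz - (k + 1) = nz - k - 1 := by ring
        rw [e1, e2]; exact hw
      rw [pvLoopB_some q t nz (k + 1) (p + x) (t - (nz - k) * x) w hw']
      have : t - p - (nz - k) * x + p = t - (nz - k) * x := by ring
      rw [this] at hv
      rw [← hv]

-- on a nonempty zero-free list with the true sum and length, A's recursion returns
theorem pvRecA_some_nozero : ∀ (q : List Int), q ≠ [] → (∀ x ∈ q, x ≠ 0) →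
    ∀ pre : Int, ∃ v, pvRecA q q.sum (q.length : Int) pre = some v := by
  intro q
  induction q with
  | nil => intro h; exact absurd rfl h
  | cons x q ih =>
    intro _ hnz pre
    by_cases hq : q = []
    · subst hq
      exact ⟨pre, by simp [pvRecA]⟩
    · by_cases h0 : (x :: q).sum - ((x :: q).length : Int) * x = 0
      · exact ⟨pre, by simp only [pvRecA, if_pos h0]⟩
      · obtain ⟨w, hw⟩ := ih hq (fun y hy => hnz y (List.mem_cons_of_mem x hy)) (pre + x)
        refine ⟨min ((x :: q).sum - ((x :: q).length : Int) * x + pre) w, ?_⟩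
        simp only [pvRecA, if_neg h0]
        have e1 : (x :: q).sum - x = q.sum := by rw [List.sum_cons]; ring
        have e2 : ((x :: q).length : Int) - 1 = (q.length : Int) := by
          simp [List.length_cons]
        rw [e1, e2, hw, Option.map_some]

-- A's n_non_zero foldl equals B's generator sum
theorem nz_foldl_eq (l : List Int) : ∀ acc : Int,
    l.foldl (fun acc i => if i != 0 then acc + 1 else acc) acc
      = acc + ((l.filter (fun b => b != 0)).map (fun _ => (1 : Int))).sum := by
  induction l with
  | nil => intro acc; simp
  | cons x l ih =>
    intro acc
    by_cases hx : x = 0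
    · subst hx; simpa using ih acc
    · have hx' : (x != 0) = true := by simpa using hx
      simp only [List.foldl_cons, List.filter_cons, hx', if_pos, List.map_cons,
        List.sum_cons]
      rw [ih (acc + 1)]; ring

theorem nz_all (l : List Int) (h : ∀ x ∈ l, x ≠ 0) :
    ((l.filter (fun b => b != 0)).map (fun _ => (1 : Int))).sum = (l.length : Int) := by
  induction l with
  | nil => simp
  | cons x l ih =>
    have hx : (x != 0) = true := by simpa using h x (List.mem_cons_self)
    simp only [List.filter_cons, hx, if_pos, List.map_cons, List.sum_cons,
      List.length_cons]
    rw [ih (fun y hy => h y (List.mem_cons_of_mem x hy))]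
    push_cast; ring

theorem nz_zero (l : List Int) (h : ∀ x ∈ l, x = 0) :
    ((l.filter (fun b => b != 0)).map (fun _ => (1 : Int))).sum = 0 := by
  induction l with
  | nil => simp
  | cons x l ih =>
    have hx : (x != 0) = false := by simpa using h x (List.mem_cons_self)
    simp only [List.filter_cons, hx]
    exact ih (fun y hy => h y (List.mem_cons_of_mem x hy))

-- ===== VERDICT (by name: the statement is the Claim_ definition above) =====
theorem minumum_removal_spec : Claim_equal_minumum_removal := by
  intro beans _ hPre
  obtain ⟨hne, hcase⟩ := hPre
  unfold Spec_minumum_removal minumum_removal minumum_removal_alt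
  set q := PySem.List.sorted beans (fun x => x) false with hqdef
  have hperm : q.Perm beans := PySem.List.sorted_perm beans (fun x => x) false
  have hsum : q.sum = beans.sum := hperm.sum_eq
  have hlen : q.length = beans.length := hperm.length_eq
  have hqne : q ≠ [] := by
    intro h
    apply hne
    have := hlen; rw [h] at this
    exact List.length_eq_zero_iff.mp this.symm
  set nzB : Int := ((beans.filter (fun b => b != 0)).map (fun _ => (1 : Int))).sum
    with hnzB
  have hfold : beans.foldl (fun acc i => if i != 0 then acc + 1 else acc) 0 = nzB := by
    have h := nz_foldl_eq beans 0
    rw [zero_add] at h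
    rw [hnzB]; exact h
  have hmain : ∃ v, pvRecA q beans.sum nzB 0 = some v := by
    rcases hcase with hno | hzero
    · have hnoq : ∀ x ∈ q, x ≠ 0 := fun x hx => hno x (hperm.mem_iff.mp hx)
      have hnz : nzB = (q.length : Int) := by
        rw [hnzB, nz_all beans hno, hlen]
      rw [hnz, ← hsum]
      exact pvRecA_some_nozero q hqne hnoq 0
    · have hs0 : beans.sum = 0 := List.sum_eq_zero hzero
      have hnz0 : nzB = 0 := by rw [hnzB]; exact nz_zero beans hzero
      obtain ⟨y, t, hyt⟩ := List.exists_cons_of_ne_nil hqne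
      refine ⟨0, ?_⟩
      rw [hyt, hs0, hnz0]
      simp [pvRecA]
  obtain ⟨v, hv⟩ := hmain
  have hA : pvRecA q beans.sum nzB 0 = some v := hv
  have hB : pvLoopB q beans.sum nzB 0 0 none = some v := by
    apply pvLoopB_none
    simpa using hv
  simp only [hfold, hsum, hA, hB]
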